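-- pv_equiv track=rewrite | github.com/vortech11/Comp-to-Scratch | src/fileHandler.py | createBoolBrackets
-- ===== SOURCE A (Python) =====
-- inputDoubleDelimiter = [">", "<", "==", ">=", "<=", "!="]
--
-- openbrackets = ["(", "{", "["]
--
-- closebrackets = [")", "}", "]"]
--
-- def createBoolBrackets(lineTokens):
--     outTokens = []
--     lastOpenBracket = None
--     for item in lineTokens:
--         if item in openbrackets and lastOpenBracket != "Close":
--             outTokens.append("[")
--             lastOpenBracket = len(outTokens)
--         elif item in closebrackets and lastOpenBracket == "Close":
--             outTokens.append("]")
--             outTokens.append("]")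
--             lastOpenBracket = None
--         elif item in inputDoubleDelimiter:
--             if isinstance(lastOpenBracket, int):
--                 outTokens.insert(lastOpenBracket, "[")
--                 lastOpenBracket = "Close"
--             outTokens.append("]")
--             outTokens.append(item)
--             outTokens.append("[")
--         else:
--             outTokens.append(item)
--
--     return outTokens
-- ===== SOURCE B (Python) =====
-- inputDoubleDelimiter = [">", "<", "==", ">=", "<=", "!="]
--
-- openbrackets = ["(", "{", "["]
--
-- closebrackets = [")", "}", "]"]
--
-- def createBoolBrackets(lineTokens):
--     # Deferred insertion: `done` holds everything up to (and including) the
--     # possible insertion point, `pending` everything after it; state 0=None,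
--     # 1=insertion point armed, 2="Close"; no middle-of-list insert is needed.
--     done = []
--     pending = []
--     state = 0
--     for item in lineTokens:
--         if item in openbrackets and state != 2:
--             done.extend(pending)
--             pending = []
--             done.append("[")
--             state = 1
--         elif item in closebrackets and state == 2:
--             pending.append("]")
--             pending.append("]")
--             state = 0
--         elif item in inputDoubleDelimiter:
--             if state == 1:
--                 done.append("[")
--                 state = 2
--             pending.append("]")
--             pending.append(item)
--             pending.append("[")
--         else:
--             pending.append(item)
--     return done + pending
-- ===== Notes on version B (the rewrite author's own statement) =====
-- stated objective: alternative
-- what changed: B replaces A's list.insert at a remembered index by a two-buffer deferred-insertion pass: tokens before/after the potential insertion point are kept in separate lists and concatenated once at the end, so no middle-of-list insertion ever happens.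
import Mathlib
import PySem

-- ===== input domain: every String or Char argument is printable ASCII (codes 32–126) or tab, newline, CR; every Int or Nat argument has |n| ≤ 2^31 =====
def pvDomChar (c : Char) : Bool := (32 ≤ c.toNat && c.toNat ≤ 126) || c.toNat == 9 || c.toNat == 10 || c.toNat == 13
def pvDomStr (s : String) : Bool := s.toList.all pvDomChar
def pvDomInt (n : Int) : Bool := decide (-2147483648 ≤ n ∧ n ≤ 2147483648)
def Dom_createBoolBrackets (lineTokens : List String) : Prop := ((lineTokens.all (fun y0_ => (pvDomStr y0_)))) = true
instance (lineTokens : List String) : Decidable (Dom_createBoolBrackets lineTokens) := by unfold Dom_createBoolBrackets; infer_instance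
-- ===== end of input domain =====

-- B defers the "[" insertion via two buffers merged once at the end, instead of A's list.insert at a remembered index.

-- ===== PORT A =====
def pvInputDoubleDelimiter : List String := [">", "<", "==", ">=", "<=", "!="]
def pvOpenbrackets : List String := ["(", "{", "["]
def pvClosebrackets : List String := [")", "}", "]"]

-- lastOpenBracket in A is None, an int, or the string "Close"
inductive pvLOB where
  | none : pvLOB
  | idx : Int → pvLOB
  | close : pvLOB
deriving DecidableEq, Repr

def pvAstep (s : List String × pvLOB) (item : String) : List String × pvLOB :=
  match s with
  | (outTokens, lob) =>
    if item ∈ pvOpenbrackets ∧ lob ≠ pvLOB.close then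
      (outTokens ++ ["["], pvLOB.idx ((outTokens.length + 1 : Nat) : Int))
    else if item ∈ pvClosebrackets ∧ lob = pvLOB.close then
      (outTokens ++ ["]"] ++ ["]"], pvLOB.none)
    else if item ∈ pvInputDoubleDelimiter then
      match lob with
      | pvLOB.idx p => ((PySem.List.insert outTokens p "[") ++ ["]"] ++ [item] ++ ["["], pvLOB.close)
      | _ => (outTokens ++ ["]"] ++ [item] ++ ["["], lob)
    else (outTokens ++ [item], lob)

def createBoolBrackets (lineTokens : List String) : List String :=
  (lineTokens.foldl pvAstep ([], pvLOB.none)).1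

-- ===== PORT B =====
def pvBstep (s : List String × List String × Nat) (item : String) : List String × List String × Nat :=
  match s with
  | (done, pending, state) =>
    if item ∈ pvOpenbrackets ∧ state ≠ 2 then
      (done ++ pending ++ ["["], [], 1)
    else if item ∈ pvClosebrackets ∧ state = 2 then
      (done, pending ++ ["]"] ++ ["]"], 0)
    else if item ∈ pvInputDoubleDelimiter then
      if state = 1 then
        (done ++ ["["], pending ++ ["]"] ++ [item] ++ ["["], 2)
      else
        (done, pending ++ ["]"] ++ [item] ++ ["["], state)
    else (done, pending ++ [item], state)

def createBoolBrackets_alt (lineTokens : List String) : List String :=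
  match lineTokens.foldl pvBstep ([], [], 0) with
  | (done, pending, _) => done ++ pending

-- ===== PRECONDITION & SPEC =====
def Spec_createBoolBrackets (lineTokens : List String) (out : List String) : Prop := out = createBoolBrackets_alt lineTokens
instance (lineTokens : List String) (out : List String) : Decidable (Spec_createBoolBrackets lineTokens out) := by unfold Spec_createBoolBrackets; infer_instance

-- ===== CLAIM (what is proved, stated in full; the proofs are below) =====
def Claim_equal_createBoolBrackets : Prop := ∀ (lineTokens : List String), Dom_createBoolBrackets lineTokens → Spec_createBoolBrackets lineTokens (createBoolBrackets lineTokens)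

-- ===== LEMMAS AND PROOFS =====

-- The simulation relation between A's state and B's state
def pvInv (s : List String × pvLOB) (t : List String × List String × Nat) : Prop :=
  s.1 = t.1 ++ t.2.1 ∧
  ((t.2.2 = 0 ∧ s.2 = pvLOB.none) ∨
   (t.2.2 = 1 ∧ s.2 = pvLOB.idx ((t.1.length : Nat) : Int)) ∨
   (t.2.2 = 2 ∧ s.2 = pvLOB.close))

theorem pvInv_step (s : List String × pvLOB) (t : List String × List String × Nat)
    (h : pvInv s t) (item : String) : pvInv (pvAstep s item) (pvBstep t item) := by
  obtain ⟨out, lob⟩ := s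
  obtain ⟨done, pending, st⟩ := t
  obtain ⟨hout, hst⟩ := h
  simp only at hout
  subst hout
  rcases hst with ⟨h0, hl⟩ | ⟨h1, hl⟩ | ⟨h2, hl⟩ <;> subst hl <;> first
  | (subst h0; simp only [pvAstep, pvBstep]; split_ifs with c1 c2 c3 c4 <;>
      simp_all [pvInv, pvInputDoubleDelimiter, pvOpenbrackets, pvClosebrackets] <;> try omega)
  | (subst h1; simp only [pvAstep, pvBstep]; split_ifs with c1 c2 c3 c4 <;>
      simp_all [pvInv, pvInputDoubleDelimiter, pvOpenbrackets, pvClosebrackets,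
        PySem.List.insert_natCast _ _ _ (by simp : done.length ≤ (done ++ pending).length)] <;> try omega)
  | (subst h2; simp only [pvAstep, pvBstep]; split_ifs with c1 c2 c3 c4 <;>
      simp_all [pvInv, pvInputDoubleDelimiter, pvOpenbrackets, pvClosebrackets] <;> try omega)

theorem pvInv_foldl (l : List String) (s : List String × pvLOB) (t : List String × List String × Nat)
    (h : pvInv s t) : pvInv (l.foldl pvAstep s) (l.foldl pvBstep t) := by
  induction l generalizing s t with
  | nil => exact h
  | cons x xs ih => exact ih _ _ (pvInv_step s t h x)

-- ===== VERDICT (by name: the statement is the Claim_ definition above) =====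
theorem createBoolBrackets_spec : Claim_equal_createBoolBrackets := by
  intro lineTokens _
  unfold Spec_createBoolBrackets createBoolBrackets createBoolBrackets_alt
  have h := pvInv_foldl lineTokens ([], pvLOB.none) ([], [], 0) (by simp [pvInv])
  rcases hfa : lineTokens.foldl pvAstep ([], pvLOB.none) with ⟨out, lob⟩
  rcases hfb : lineTokens.foldl pvBstep ([], [], 0) with ⟨done, pending, st⟩
  rw [hfa, hfb] at h
  exact h.1
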